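-- pv_equiv track=rewrite | github.com/Shahanashahin123/resume-analyzer | model.py | skill_match
-- ===== SOURCE A (Python) =====
-- skills_db = [
--     "python", "machine learning", "deep learning",
--     "nlp", "data science", "sql", "power bi",
--     "tableau", "django", "flask", "react",
--     "node js", "tensorflow", "pytorch"
-- ]
--
-- def skill_match(resume_text):
--     text = resume_text.lower()
--
--     matched = []
--     for skill in skills_db:
--         if skill in text:
--             matched.append(skill)
--
--     missing = [s for s in skills_db if s not in matched]
--
--     return matched, missing
-- ===== SOURCE B (Python) =====
-- skills_db = [
--     "python", "machine learning", "deep learning",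
--     "nlp", "data science", "sql", "power bi",
--     "tableau", "django", "flask", "react",
--     "node js", "tensorflow", "pytorch"
-- ]
--
-- def skill_match(resume_text):
--     text = resume_text.lower()
--
--     def go(skills):
--         # recursion on the skill list, building both results back-to-front by prepending
--         if not skills:
--             return [], []
--         head, rest = skills[0], skills[1:]
--         m, ms = go(rest)
--         if head in text:
--             return [head] + m, ms
--         return m, [head] + ms
--
--     return go(skills_db)
-- ===== Notes on version B (the rewrite author's own statement) =====
-- stated objective: alternative
-- what changed: Replaces A's two iterative passes (append-accumulation of matched, then a complement re-scan of skills_db with a membership test against matched) by a single structural recursion over the skill list that builds both result lists back-to-front by prepending, with no membership test at all.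
import Mathlib
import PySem

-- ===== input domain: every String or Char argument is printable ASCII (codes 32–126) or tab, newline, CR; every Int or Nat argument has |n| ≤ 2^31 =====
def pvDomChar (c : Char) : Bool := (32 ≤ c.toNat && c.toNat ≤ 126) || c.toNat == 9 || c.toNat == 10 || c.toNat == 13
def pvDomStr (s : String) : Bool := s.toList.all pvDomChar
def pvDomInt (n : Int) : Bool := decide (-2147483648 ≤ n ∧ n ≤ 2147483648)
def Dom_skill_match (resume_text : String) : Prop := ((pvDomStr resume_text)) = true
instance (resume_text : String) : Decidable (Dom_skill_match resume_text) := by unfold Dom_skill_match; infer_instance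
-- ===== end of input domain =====

-- B replaces A's two iterative passes (matched accumulation, then a complement re-scan with a
-- membership test) by one structural recursion that builds both lists back-to-front by prepending.

-- ===== PORT A =====
def skills_db : List String :=
  ["python", "machine learning", "deep learning",
   "nlp", "data science", "sql", "power bi",
   "tableau", "django", "flask", "react",
   "node js", "tensorflow", "pytorch"]

def skill_match (resume_text : String) : List String × List String :=
  let text := PySem.Str.lower resume_text
  let matched := skills_db.foldl
    (fun acc skill => if PySem.Str.isIn skill text then acc ++ [skill] else acc) []
  let missing := skills_db.filter (fun s => !(matched.contains s))
  (matched, missing)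

-- ===== PORT B =====
def skill_match_go (text : String) : List String → List String × List String
  | [] => ([], [])
  | head :: rest =>
    let p := skill_match_go text rest
    if PySem.Str.isIn head text then (head :: p.1, p.2) else (p.1, head :: p.2)

def skill_match_alt (resume_text : String) : List String × List String :=
  let text := PySem.Str.lower resume_text
  skill_match_go text skills_db

-- ===== PRECONDITION & SPEC =====
def Spec_skill_match (resume_text : String) (out : List String × List String) : Prop := out = skill_match_alt resume_text
instance (resume_text : String) (out : List String × List String) : Decidable (Spec_skill_match resume_text out) := by unfold Spec_skill_match; infer_instance

-- ===== CLAIM (what is proved, stated in full; the proofs are below) =====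
def Claim_equal_skill_match : Prop := ∀ (resume_text : String), Dom_skill_match resume_text → Spec_skill_match resume_text (skill_match resume_text)

-- ===== LEMMAS AND PROOFS =====

-- B's recursion is the pair of the two filters.
theorem go_eq_filter (text : String) (l : List String) :
    skill_match_go text l
      = (l.filter (fun s => PySem.Str.isIn s text),
         l.filter (fun s => !(PySem.Str.isIn s text))) := by
  induction l with
  | nil => simp [skill_match_go]
  | cons x xs ih =>
    simp only [skill_match_go, ih, List.filter_cons]
    generalize PySem.Str.isIn x text = b
    cases b <;> simp

-- A's complement pass over skills_db with 'not in filter p skills_db' is 'filter (!p)'.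
theorem filter_not_mem_filter (p : String → Bool) (l : List String) :
    l.filter (fun s => !((l.filter p).contains s)) = l.filter (fun s => !p s) := by
  apply List.filter_congr
  intro s hs
  simp [List.mem_filter, hs]

-- ===== VERDICT (by name: the statement is the Claim_ definition above) =====
theorem skill_match_spec : Claim_equal_skill_match := by
  intro t _
  show _ = _
  simp only [skill_match, skill_match_alt]
  rw [PySem.List.foldl_append_if_eq_filter, go_eq_filter]
  simp only [List.nil_append]
  rw [filter_not_mem_filter]
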